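-- pv_equiv track=rewrite | github.com/ManiGaneshwari/Video_Generator | src/script_optimizer.py | _even_distribution
-- ===== SOURCE A (Python) =====
-- from typing import Dict, Any, List, Optional, Tuple
--
-- def _even_distribution(lines: List[str], num_images: int) -> List[str]:
--     """Distribute lines evenly across images."""
--     lines_per_image = len(lines) // num_images
--     remainder = len(lines) % num_images
--
--     grouped_texts = []
--     start_idx = 0
--
--     for i in range(num_images):
--         # Calculate how many lines for this image
--         lines_for_this_image = lines_per_image
--         if i < remainder:
--             lines_for_this_image += 1
--
--         end_idx = start_idx + lines_for_this_image
--         group_lines = lines[start_idx:end_idx]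
--
--         if group_lines:
--             grouped_texts.append(' '.join(group_lines))
--         else:
--             grouped_texts.append('')  # Empty slide if no content
--
--         start_idx = end_idx
--
--     return grouped_texts
-- ===== SOURCE B (Python) =====
-- from typing import List
--
-- def _even_distribution(lines: List[str], num_images: int) -> List[str]:
--     """Distribute lines evenly across images (single pass over lines, flush on capacity)."""
--     q, r = divmod(len(lines), num_images)
--     out, cur = [], []
--     for line in lines:
--         cur.append(line)
--         if len(cur) == q + (1 if len(out) < r else 0):
--             out.append(' '.join(cur))
--             cur = []
--     out += [''] * (num_images - len(out))
--     return out
-- ===== Notes on version B (the rewrite author's own statement) =====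
-- stated objective: alternative
-- what changed: B makes a single pass over the lines, accumulating the current group and flushing it when it reaches its capacity (computed from divmod), then pads the result with empty strings up to num_images; A instead loops over group indices and slices the list with a running start index.
import Mathlib
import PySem

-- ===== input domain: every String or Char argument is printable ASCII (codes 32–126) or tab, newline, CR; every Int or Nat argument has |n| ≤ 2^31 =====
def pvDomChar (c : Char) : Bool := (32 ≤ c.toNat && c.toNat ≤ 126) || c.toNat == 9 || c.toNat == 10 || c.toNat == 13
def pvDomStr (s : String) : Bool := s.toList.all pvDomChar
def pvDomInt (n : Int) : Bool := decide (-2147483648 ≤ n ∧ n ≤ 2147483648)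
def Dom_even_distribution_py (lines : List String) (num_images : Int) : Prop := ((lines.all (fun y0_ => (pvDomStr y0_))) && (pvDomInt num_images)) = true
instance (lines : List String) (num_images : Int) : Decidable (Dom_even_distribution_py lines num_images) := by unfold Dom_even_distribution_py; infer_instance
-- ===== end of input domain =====

-- B replaces A's loop over group indices (slicing by a running start index) with a single
-- pass over the lines that flushes the current group when it reaches its capacity, then pads
-- with empty strings (objective: alternative).

-- ===== PORT A =====
-- A's loop body as a named helper; grouped_texts is an Array (Python list.append is O(1))
def stepA (lines : List String) (lines_per_image remainder : Int)
    (st : Array String × Int) (i : Int) : Array String × Int :=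
  let lines_for_this_image := lines_per_image + (if i < remainder then 1 else 0)
  let end_idx := st.2 + lines_for_this_image
  let group_lines := PySem.List.slice lines (some st.2) (some end_idx)
  (if group_lines ≠ [] then st.1.push (PySem.Str.join " " group_lines)
   else st.1.push "", end_idx)

def even_distribution_py (lines : List String) (num_images : Int) : List String :=
  let lines_per_image := PySem.Int.floordiv (lines.length : Int) num_images
  let remainder := PySem.Int.mod (lines.length : Int) num_images
  ((PySem.List.pyRange 0 num_images 1).foldl (stepA lines lines_per_image remainder) (#[], 0)).1.toList

-- ===== PORT B =====
-- B's loop body: append the line to the current group, flush when the group is full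
def stepB (q r : Int) (st : List String × List String) (line : String) :
    List String × List String :=
  let cur := st.2 ++ [line]
  if (cur.length : Int) = q + (if (st.1.length : Int) < r then 1 else 0)
  then (st.1 ++ [PySem.Str.join " " cur], [])
  else (st.1, cur)

def even_distribution_py_alt (lines : List String) (num_images : Int) : List String :=
  let q := PySem.Int.floordiv (lines.length : Int) num_images
  let r := PySem.Int.mod (lines.length : Int) num_images
  let st := lines.foldl (stepB q r) ([], [])
  st.1 ++ List.replicate ((num_images - st.1.length).toNat) ""

-- ===== PRECONDITION & SPEC =====
-- num_images = 0 makes Python A raise ZeroDivisionError (B raises there too)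
def Pre_even_distribution_py (lines : List String) (num_images : Int) : Prop := num_images ≠ 0
instance (lines : List String) (num_images : Int) : Decidable (Pre_even_distribution_py lines num_images) := by unfold Pre_even_distribution_py; infer_instance
def pvWitness_even_distribution_py : List String × Int := (["a", "b", "c"], 2)

def Spec_even_distribution_py (lines : List String) (num_images : Int) (out : List String) : Prop := out = even_distribution_py_alt lines num_images
instance (lines : List String) (num_images : Int) (out : List String) : Decidable (Spec_even_distribution_py lines num_images out) := by unfold Spec_even_distribution_py; infer_instance

-- ===== CLAIM (what is proved, stated in full; the proofs are below) =====
def Claim_equal_even_distribution_py : Prop := ∀ (lines : List String) (num_images : Int), Dom_even_distribution_py lines num_images → Pre_even_distribution_py lines num_images → Spec_even_distribution_py lines num_images (even_distribution_py lines num_images)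

-- ===== LEMMAS AND PROOFS =====

-- joining an empty group gives the empty string, so A's empty-group branch collapses
lemma join_nil_str : PySem.Str.join " " [] = "" := by decide

-- A's end index equals the closed-form bound for the next group
lemma hend_eq (m q r : Int) (hr : 0 ≤ r) :
    m * q + min m r + (q + (if m < r then 1 else 0)) = (m + 1) * q + min (m + 1) r := by
  by_cases h : m < r
  · have h1 : min m r = m := by omega
    have h2 : min (m+1) r = m+1 := by omega
    rw [h1, h2]; simp only [h, if_pos]; ring
  · have h1 : min m r = r := by omega
    have h2 : min (m+1) r = r := by omega
    rw [h1, h2]; simp only [h, if_neg, not_false_iff]; ring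

-- one step of A's loop, started at the closed-form start index, emits the i-th closed-form group
lemma stepA_eq (lines : List String) (q r m : Int) (acc : Array String)
    (hr : 0 ≤ r) :
    stepA lines q r (acc, m * q + min m r) m
    = (acc.push (PySem.Str.join " "
        (PySem.List.slice lines (some (m * q + min m r)) (some ((m + 1) * q + min (m + 1) r)))),
       (m + 1) * q + min (m + 1) r) := by
  unfold stepA
  simp only
  rw [hend_eq m q r hr]
  by_cases hg : PySem.List.slice lines (some (m * q + min m r)) (some ((m + 1) * q + min (m + 1) r)) = []
  · rw [hg, if_neg (by simp), join_nil_str]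
  · rw [if_pos hg]

-- loop invariant for A: the fold from index m with start_idx = m*q + min m r
-- yields acc ++ the closed-form groups for indices m..n-1
lemma loop_inv (lines : List String) (n q r : Int) (hr : 0 ≤ r) :
    ∀ (m : Int) (acc : Array String), 0 ≤ m →
    ((PySem.List.pyRange m n 1).foldl (stepA lines q r) (acc, m * q + min m r)).1.toList
    = acc.toList ++ (PySem.List.pyRange m n 1).map
        (fun i => PySem.Str.join " "
          (PySem.List.slice lines (some (i * q + min i r)) (some ((i + 1) * q + min (i + 1) r)))) := by
  intro m
  by_cases hmn : m < n
  · have hfuel : (n - m).toNat ≠ 0 := by omega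
    generalize hF : (n - m).toNat = F at *
    induction F generalizing m with
    | zero => omega
    | succ F ih =>
      intro acc hm
      rw [PySem.List.pyRange_one_cons hmn]
      simp only [List.foldl_cons, List.map_cons]
      rw [stepA_eq lines q r m acc hr]
      by_cases hm1 : m + 1 < n
      · rw [ih (m + 1) hm1 (by omega) (by omega) _ (by omega)]
        simp
      · have hn : n = m + 1 := by omega
        subst hn
        rw [PySem.List.pyRange_one_eq_nil (by omega)]
        simp
  · intro acc hm
    rw [PySem.List.pyRange_one_eq_nil (by omega)]
    simp

-- Nat-level start index, capacity, number of flushed groups and chunk of group m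
def sN (qn rn m : Nat) : Nat := m * qn + min m rn
def capN (qn rn m : Nat) : Nat := qn + (if m < rn then 1 else 0)
def kB (qn rn N : Nat) : Nat := if qn = 0 then rn else N
def chunkN (lines : List String) (qn rn m : Nat) : List String :=
  (lines.drop (sN qn rn m)).take (capN qn rn m)

lemma sN_succ (qn rn m : Nat) : sN qn rn (m + 1) = sN qn rn m + capN qn rn m := by
  unfold sN capN
  by_cases h : m < rn <;> simp [h, Nat.add_mul] <;> omega

lemma sN_le (qn rn N j : Nat) (hrn : rn < N) (hj : j ≤ kB qn rn N) :
    sN qn rn j ≤ N * qn + rn := by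
  unfold sN kB at *
  by_cases h0 : qn = 0
  · subst h0; simp
  · rw [if_neg h0] at hj
    have : j * qn ≤ N * qn := Nat.mul_le_mul_right qn hj
    omega

lemma sN_k (qn rn N : Nat) (hrn : rn < N) : sN qn rn (kB qn rn N) = N * qn + rn := by
  unfold sN kB
  by_cases h0 : qn = 0
  · rw [if_pos h0, h0]; simp
  · rw [if_neg h0]
    have : min N rn = rn := by omega
    rw [this]

-- the two outcomes of one step of B's loop
lemma stepB_flush (q r : Int) (acc cur : List String) (a : String)
    (h : ((cur ++ [a]).length : Int) = q + (if ((acc.length : Int) < r) then 1 else 0)) :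
    stepB q r (acc, cur) a = (acc ++ [PySem.Str.join " " (cur ++ [a])], []) := by
  unfold stepB; rw [if_pos h]

lemma stepB_keep (q r : Int) (acc cur : List String) (a : String)
    (h : ¬ ((cur ++ [a]).length : Int) = q + (if ((acc.length : Int) < r) then 1 else 0)) :
    stepB q r (acc, cur) a = (acc, cur ++ [a]) := by
  unfold stepB; rw [if_neg h]

-- filling one group: folding B's step over a chunk of exactly the current capacity flushes it
lemma fillB (q r : Int) : ∀ (ch : List String) (acc cur : List String), ch ≠ [] →
    ((cur.length : Int) + ch.length = q + (if ((acc.length : Int) < r) then 1 else 0)) →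
    ch.foldl (stepB q r) (acc, cur) = (acc ++ [PySem.Str.join " " (cur ++ ch)], []) := by
  intro ch
  induction ch with
  | nil => intro _ _ h; exact absurd rfl h
  | cons a t ih =>
    intro acc cur _ h
    rw [List.foldl_cons]
    by_cases ht : t = []
    · subst ht
      rw [stepB_flush q r acc cur a (by
        simp only [List.length_cons, List.length_nil] at h
        simp only [List.length_append, List.length_cons, List.length_nil]
        split_ifs at h ⊢ <;> push_cast at h ⊢ <;> omega)]
      simp
    · have htlen : 0 < t.length := List.length_pos_iff.mpr ht
      rw [stepB_keep q r acc cur a (by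
        simp only [List.length_cons] at h
        simp only [List.length_append, List.length_cons, List.length_nil]
        split_ifs at h ⊢ <;> push_cast at h ⊢ <;> omega)]
      rw [ih acc (cur ++ [a]) ht (by
        simp only [List.length_cons] at h
        simp only [List.length_append, List.length_cons, List.length_nil]
        split_ifs at h ⊢ <;> push_cast at h ⊢ <;> omega)]
      simp

-- with non-positive q and r (num_images < 0), B's flush condition never fires
lemma fold_no_flush (q r : Int) (hq : q ≤ 0) (hr : r ≤ 0) :
    ∀ (l cur : List String), (l.foldl (stepB q r) ([], cur)).1 = [] := by
  intro l
  induction l with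
  | nil => intro cur; rfl
  | cons a t ih =>
    intro cur
    rw [List.foldl_cons]
    rw [stepB_keep q r [] cur a (by
      simp only [List.length_append, List.length_cons, List.length_nil]
      split_ifs <;> push_cast <;> omega)]
    exact ih (cur ++ [a])

-- B's fold, started at group m with an empty current group, emits the chunks m..k-1 and ends flushed
lemma bState (lines : List String) (qn rn N : Nat) (hrn : rn < N)
    (hL : lines.length = N * qn + rn) :
    ∀ (j m : Nat) (acc : List String), m + j = kB qn rn N → acc.length = m →
    (lines.drop (sN qn rn m)).foldl (stepB (qn : Int) (rn : Int)) (acc, []) =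
      (acc ++ (List.range' m j).map (fun i => PySem.Str.join " " (chunkN lines qn rn i)), []) := by
  intro j
  induction j with
  | zero =>
    intro m acc hm hacc
    have hmk : m = kB qn rn N := by omega
    have hdrop : lines.drop (sN qn rn m) = [] := by
      apply List.drop_eq_nil_of_le
      rw [hL, hmk, sN_k qn rn N hrn]
    rw [hdrop]
    simp
  | succ j ih =>
    intro m acc hm hacc
    have hmk : m < kB qn rn N := by omega
    have hcap : 0 < capN qn rn m := by
      unfold capN kB at *
      by_cases h0 : qn = 0
      · rw [if_pos h0] at hmk
        rw [if_pos (by omega : m < rn)]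
        omega
      · rw [if_neg h0] at hmk
        by_cases h : m < rn
        · rw [if_pos h]; omega
        · rw [if_neg h]; omega
    have hbound : sN qn rn m + capN qn rn m ≤ lines.length := by
      rw [hL, ← sN_succ]
      exact sN_le qn rn N (m + 1) hrn (by omega)
    have hchlen : (chunkN lines qn rn m).length = capN qn rn m := by
      unfold chunkN
      rw [List.length_take, List.length_drop]
      omega
    have hsplit : lines.drop (sN qn rn m) = chunkN lines qn rn m ++ lines.drop (sN qn rn (m + 1)) := by
      unfold chunkN
      rw [sN_succ]
      rw [← List.drop_drop]
      exact (List.take_append_drop _ _).symm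
    rw [hsplit, List.foldl_append]
    have hne' : chunkN lines qn rn m ≠ [] := by
      intro hnil; rw [hnil] at hchlen; simp at hchlen; omega
    have hcond : ((([] : List String).length : Int) + ((chunkN lines qn rn m).length : Int)
        = (qn : Int) + (if ((acc.length : Int) < (rn : Int)) then 1 else 0)) := by
      rw [hacc, hchlen]
      simp only [List.length_nil, Nat.cast_zero, zero_add]
      unfold capN
      by_cases h : m < rn
      · rw [if_pos h, if_pos (by exact_mod_cast h : ((m : Int) < (rn : Int)))]
        push_cast; omega
      · rw [if_neg h, if_neg (fun hc => h (by exact_mod_cast hc))]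
        push_cast; omega
    rw [fillB (qn : Int) (rn : Int) (chunkN lines qn rn m) acc [] hne' hcond]
    simp only [List.nil_append]
    rw [ih (m + 1) (acc ++ [PySem.Str.join " " (chunkN lines qn rn m)]) (by omega) (by simp; omega)]
    rw [List.range'_succ]
    simp

-- beyond the flushed groups the closed-form chunk is empty
lemma chunk_empty (lines : List String) (qn rn N i : Nat) (hrn : rn < N)
    (hL : lines.length = N * qn + rn) (hi : kB qn rn N ≤ i) :
    chunkN lines qn rn i = [] := by
  unfold chunkN
  have : lines.length ≤ sN qn rn i := by
    unfold kB at hi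
    by_cases h0 : qn = 0
    · simp [h0] at hi
      unfold sN
      have : min i rn = rn := by omega
      rw [hL, h0, this]; omega
    · simp [h0] at hi
      unfold sN
      have h1 : N * qn ≤ i * qn := Nat.mul_le_mul_right qn hi
      omega
  rw [List.drop_eq_nil_of_le this]
  simp

-- the i-th closed-form slice of A is exactly the i-th chunk (Nat bounds)
lemma slice_eq_chunk (lines : List String) (qn rn i : Nat) :
    PySem.List.slice lines (some ((i : Int) * (qn : Int) + min (i : Int) (rn : Int)))
      (some (((i : Int) + 1) * (qn : Int) + min ((i : Int) + 1) (rn : Int)))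
    = chunkN lines qn rn i := by
  have h1 : (i : Int) * (qn : Int) + min (i : Int) (rn : Int) = ((sN qn rn i : Nat) : Int) := by
    unfold sN; push_cast; ring_nf
  have h2 : ((i : Int) + 1) * (qn : Int) + min ((i : Int) + 1) (rn : Int) = ((sN qn rn (i + 1) : Nat) : Int) := by
    unfold sN; push_cast; ring_nf
  rw [h1, h2, PySem.List.slice_natCast]
  unfold chunkN
  congr 1
  rw [sN_succ]
  omega

-- ===== VERDICT (by name: the statement is the Claim_ definition above) =====
theorem even_distribution_py_spec : Claim_equal_even_distribution_py := by
  intro lines n _ hpre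
  unfold Pre_even_distribution_py at hpre
  unfold Spec_even_distribution_py
  show even_distribution_py lines n = even_distribution_py_alt lines n
  show ((PySem.List.pyRange 0 n 1).foldl
      (stepA lines (PySem.Int.floordiv (lines.length : Int) n) (PySem.Int.mod (lines.length : Int) n))
      (#[], 0)).1.toList
    = (lines.foldl (stepB (PySem.Int.floordiv (lines.length : Int) n) (PySem.Int.mod (lines.length : Int) n)) ([], [])).1
      ++ List.replicate ((n - ((lines.foldl (stepB (PySem.Int.floordiv (lines.length : Int) n) (PySem.Int.mod (lines.length : Int) n)) ([], [])).1.length : Int)).toNat) ""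
  by_cases hn : 0 < n
  · -- num_images > 0
    have hfd := PySem.Int.floordiv_eq_ediv_of_pos (a := (lines.length : Int)) hn
    have hmd := PySem.Int.mod_eq_emod_of_pos (a := (lines.length : Int)) hn
    have hqnn : 0 ≤ PySem.Int.floordiv (lines.length : Int) n := by
      rw [hfd]; exact Int.ediv_nonneg (by positivity) (by omega)
    have hrnn : 0 ≤ PySem.Int.mod (lines.length : Int) n := by
      rw [hmd]; exact Int.emod_nonneg _ (by omega)
    have hrlt : PySem.Int.mod (lines.length : Int) n < n := by
      rw [hmd]; exact Int.emod_lt_of_pos _ hn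
    set qn : Nat := (PySem.Int.floordiv (lines.length : Int) n).toNat with hqn
    set rn : Nat := (PySem.Int.mod (lines.length : Int) n).toNat with hrn
    set N : Nat := n.toNat with hN
    have hqc : (qn : Int) = PySem.Int.floordiv (lines.length : Int) n := by
      rw [hqn]; exact Int.toNat_of_nonneg hqnn
    have hrc : (rn : Int) = PySem.Int.mod (lines.length : Int) n := by
      rw [hrn]; exact Int.toNat_of_nonneg hrnn
    have hNc : (N : Int) = n := by rw [hN]; exact Int.toNat_of_nonneg (by omega)
    have hrnN : rn < N := by omega
    have hL : lines.length = N * qn + rn := by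
      have hdm := PySem.Int.floordiv_mul_add_mod (lines.length : Int) n
      have hcast : ((N * qn + rn : Nat) : Int) = (lines.length : Int) := by
        push_cast
        rw [hqc, hrc, hNc, mul_comm]
        exact hdm
      exact_mod_cast hcast.symm
    -- A-side: the fold over group indices is the list of closed-form slices
    have hA := loop_inv lines n (PySem.Int.floordiv (lines.length : Int) n)
      (PySem.Int.mod (lines.length : Int) n) hrnn 0 #[] le_rfl
    have h00 : (0 : Int) * PySem.Int.floordiv (lines.length : Int) n
        + min 0 (PySem.Int.mod (lines.length : Int) n) = 0 := by omega
    rw [h00] at hA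
    simp only [List.nil_append] at hA
    rw [hA, ← hqc, ← hrc]
    -- B-side: the fold over the lines emits the chunks of the flushed groups
    have hB := bState lines qn rn N hrnN hL (kB qn rn N) 0 [] (by omega) rfl
    have hs0 : sN qn rn 0 = 0 := by unfold sN; simp
    rw [hs0, List.drop_zero] at hB
    rw [hB]
    simp only [List.nil_append, List.length_map, List.length_range']
    -- rewrite A's Int range as a Nat range and its slices as chunks
    have hpyr : PySem.List.pyRange 0 n 1 = (List.range N).map (fun i : Nat => (i : Int)) := by
      rw [← hNc]; exact PySem.List.pyRange_zero_natCast N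
    rw [hpyr, List.map_map, List.range_eq_range']
    have hmapeq : (List.range' 0 N).map
        ((fun i => PySem.Str.join " "
          (PySem.List.slice lines (some (i * (qn : Int) + min i (rn : Int)))
            (some ((i + 1) * (qn : Int) + min (i + 1) (rn : Int))))) ∘
          (fun i : Nat => (i : Int)))
        = (List.range' 0 N).map (fun i : Nat => PySem.Str.join " " (chunkN lines qn rn i)) := by
      apply List.map_congr_left
      intro i _
      simp only [Function.comp]
      rw [slice_eq_chunk]
    rw [hmapeq]
    have hk_le : kB qn rn N ≤ N := by
      unfold kB; by_cases h0 : qn = 0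
      · rw [if_pos h0]; omega
      · rw [if_neg h0]
    have hrange : List.range' 0 N = List.range' 0 (kB qn rn N) ++ List.range' (kB qn rn N) (N - kB qn rn N) := by
      conv_lhs => rw [show N = kB qn rn N + (N - kB qn rn N) by omega]
      rw [← List.range'_append]
      simp
    rw [hrange, List.map_append]
    congr 1
    -- the tail groups beyond the flushed ones are all empty strings
    have hpad : (n - (kB qn rn N : Int)).toNat = N - kB qn rn N := by omega
    rw [hpad]
    apply List.eq_replicate_iff.mpr
    constructor
    · simp
    · intro b hb
      simp only [List.mem_map] at hb
      obtain ⟨i, hi, hbe⟩ := hb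
      rw [List.mem_range'_1] at hi
      rw [chunk_empty lines qn rn N i hrnN hL hi.1] at hbe
      rw [← hbe]
      exact join_nil_str
  · -- num_images < 0: A's range is empty and B never flushes; both give []
    have hn' : n < 0 := by omega
    have hq : PySem.Int.floordiv (lines.length : Int) n ≤ 0 := by
      have heq := PySem.Int.floordiv_mul_add_mod (lines.length : Int) n
      have hb := PySem.Int.mod_neg_bounds (a := (lines.length : Int)) (b := n) hn'
      nlinarith [Int.natCast_nonneg lines.length]
    have hr : PySem.Int.mod (lines.length : Int) n ≤ 0 :=
      (PySem.Int.mod_neg_bounds (a := (lines.length : Int)) (b := n) hn').2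
    rw [PySem.List.pyRange_one_eq_nil (by omega)]
    simp only [List.foldl_nil, Array.toList_empty]
    rw [fold_no_flush _ _ hq hr lines []]
    have hz : (n - (([] : List String).length : Int)).toNat = 0 := by simp; omega
    rw [hz]
    simp
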